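-- pv_equiv track=rewrite | github.com/jstuart0/project-athena-oss | src/control_agent/huggingface.py | generate_ollama_model_name
-- ===== SOURCE A (Python) =====
-- def generate_ollama_model_name(filename: str) -> str:
--     """
--     Generate a clean Ollama model name from a GGUF filename.
--
--     Examples:
--         mistral-7b-instruct-v0.2.Q4_K_M.gguf -> mistral-7b-instruct-v0.2-q4_k_m
--         Phi-3-mini-4k-instruct-q4.gguf -> phi-3-mini-4k-instruct-q4
--     """
--     # Remove .gguf extension
--     name = filename.lower()
--     if name.endswith('.gguf'):
--         name = name[:-5]
--
--     # Replace invalid characters with hyphens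
--     name = name.replace('_', '-').replace('.', '-').replace(' ', '-')
--
--     # Remove consecutive hyphens
--     while '--' in name:
--         name = name.replace('--', '-')
--
--     # Remove leading/trailing hyphens
--     name = name.strip('-')
--
--     # Ensure it starts with a letter (Ollama requirement)
--     if name and not name[0].isalpha():
--         name = 'model-' + name
--
--     return name
-- ===== SOURCE B (Python) =====
-- def generate_ollama_model_name(filename: str) -> str:
--     """One-pass version: map separators to '-' and collapse runs in the same sweep."""
--     name = filename.lower()
--     if name.endswith('.gguf'):
--         name = name[:-5]
--
--     out = []
--     for ch in name:
--         c = '-' if ch in '_. -' else ch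
--         if c == '-' and out and out[-1] == '-':
--             continue
--         out.append(c)
--
--     name = ''.join(out).strip('-')
--
--     if name and not name[0].isalpha():
--         name = 'model-' + name
--     return name
-- ===== Notes on version B (the rewrite author's own statement) =====
-- stated objective: simpler
-- what changed: Replaces the three whole-string replace() passes plus the repeated while '--' in name: replace('--','-') rescans with a single left-to-right pass that maps each separator to '-' and skips a '-' whenever the last emitted character is already '-'.
import Mathlib
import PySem

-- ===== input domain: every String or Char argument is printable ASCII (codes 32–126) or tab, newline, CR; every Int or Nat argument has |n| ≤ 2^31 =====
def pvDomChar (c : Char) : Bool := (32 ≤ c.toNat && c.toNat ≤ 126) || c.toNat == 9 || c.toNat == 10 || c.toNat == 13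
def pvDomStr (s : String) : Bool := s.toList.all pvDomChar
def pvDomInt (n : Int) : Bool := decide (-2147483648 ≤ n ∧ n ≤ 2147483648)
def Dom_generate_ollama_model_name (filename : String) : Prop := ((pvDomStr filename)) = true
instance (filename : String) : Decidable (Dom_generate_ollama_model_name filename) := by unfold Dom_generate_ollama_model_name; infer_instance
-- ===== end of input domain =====

-- B replaces A's replace()-chain plus the repeated "while '--' in name" rescans by one
-- left-to-right pass that maps separators to '-' and collapses runs as it goes (simpler).

-- ===== PORT A =====
-- what one round of Python's name.replace('--', '-') computes (structural form of
-- PySem.Chars.replace's left-to-right non-overlapping scan; pvReplace_dd proves it exact)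
def pvRepAll : List Char → List Char
  | [] => []
  | [c] => [c]
  | c :: d :: t => if c = '-' ∧ d = '-' then '-' :: pvRepAll t else c :: pvRepAll (d :: t)

theorem pvRepAll_length_le (l : List Char) : (pvRepAll l).length ≤ l.length := by
  fun_induction pvRepAll l <;> simp_all
  omega

theorem pvGo_dd (fuel : Nat) (l acc : List Char) (h : l.length ≤ fuel) :
    PySem.Chars.replace.go ['-', '-'] ['-'] fuel l acc = acc.reverse ++ pvRepAll l := by
  induction fuel generalizing l acc with
  | zero =>
    have : l = [] := by cases l <;> simp_all
    subst this
    rw [PySem.Chars.replace.go.eq_def]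
    simp [pvRepAll]
  | succ n ih =>
    match l with
    | [] => rw [PySem.Chars.replace.go.eq_def]; simp [pvRepAll]
    | [c] =>
      rw [PySem.Chars.replace.go.eq_def]
      have hp : List.isPrefixOf ['-', '-'] [c] = false := by simp [List.isPrefixOf]
      simp only [hp]
      rw [ih [] (c :: acc) (by simp)]
      simp [pvRepAll]
    | c :: d :: t =>
      rw [PySem.Chars.replace.go.eq_def]
      simp only [List.length_cons] at h
      by_cases hp : c = '-' ∧ d = '-'
      · obtain ⟨rfl, rfl⟩ := hp
        have hpre : List.isPrefixOf ['-', '-'] ('-' :: '-' :: t) = true := by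
          simp [List.isPrefixOf]
        simp only [hpre, if_pos]
        rw [show List.drop ['-', '-'].length ('-' :: '-' :: t) = t from rfl]
        rw [ih t _ (by omega)]
        simp [pvRepAll]
      · have hpre : List.isPrefixOf ['-', '-'] (c :: d :: t) = false := by
          simp [List.isPrefixOf]
          intro h1 h2; exact hp ⟨h1.symm, h2.symm⟩
        simp only [hpre, Bool.false_eq_true, if_neg, not_false_iff]
        rw [ih (d :: t) (c :: acc) (by simp; omega)]
        simp [pvRepAll, hp]

theorem pvReplace_dd (l : List Char) :
    PySem.Chars.replace l ['-', '-'] ['-'] = pvRepAll l := by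
  rw [PySem.Chars.replace]
  simp [pvGo_dd l.length l [] (le_refl _)]

theorem pvRepAll_length_lt (l : List Char) (h : ['-', '-'] <:+: l) :
    (pvRepAll l).length < l.length := by
  fun_induction pvRepAll l with
  | case1 => simp at h
  | case2 c =>
    exfalso
    obtain ⟨s, t, he⟩ := h
    cases s <;> simp_all
  | case3 c d t hcd ih =>
    have := pvRepAll_length_le t
    simp; omega
  | case4 c d t hcd ih =>
    have hdt : ['-', '-'] <:+: d :: t := by
      rcases List.infix_cons_iff.mp h with hpre | hinf
      · exfalso
        obtain ⟨r, hr⟩ := hpre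
        injection hr with h1 h2; injection h2 with h3 _
        exact hcd ⟨h1.symm, h3.symm⟩
      · exact hinf
    have := ih hdt
    simp at this ⊢; omega

-- one loop iteration shortens the string: termination of the while loop below
theorem pvCollapse_step_lt (s : String) (h : PySem.Str.isIn "--" s = true) :
    (PySem.Str.replace s "--" "-").toList.length < s.toList.length := by
  have hl : (PySem.Str.replace s "--" "-").toList
      = PySem.Chars.replace s.toList "--".toList "-".toList := by
    simp [PySem.Str.toList_replace]
  rw [hl]
  have h2 : "--".toList = ['-', '-'] := by decide
  have h3 : "-".toList = ['-'] := by decide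
  rw [h2, h3, pvReplace_dd]
  apply pvRepAll_length_lt
  have h4 : PySem.Chars.isIn "--".toList s.toList = true := by
    simpa [PySem.Str.isIn] using h
  rw [h2] at h4
  exact (PySem.Chars.isIn_iff_infix _ _).mp h4

-- Python: while '--' in name: name = name.replace('--', '-')
def pvACollapse (s : String) : String :=
  if h : PySem.Str.isIn "--" s = true then pvACollapse (PySem.Str.replace s "--" "-") else s
  termination_by s.toList.length
  decreasing_by exact pvCollapse_step_lt s h

-- Python: if name and not name[0].isalpha(): name = 'model-' + name
def pvAGuard (name : String) : String :=
  match name.toList with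
  | [] => name
  | c :: _ => if ¬ (PySem.Chars.isalpha c = true) then "model-" ++ name else name

def generate_ollama_model_name (filename : String) : String :=
  pvAGuard (PySem.Str.stripChars (pvACollapse (PySem.Str.replace (PySem.Str.replace (PySem.Str.replace
    (if PySem.Str.endswith (PySem.Str.lower filename) ".gguf" = true
      then PySem.Str.slice (PySem.Str.lower filename) none (some (-5))
      else PySem.Str.lower filename) "_" "-") "." "-") " " "-")) "-")

-- ===== PORT B =====
-- the characters of '_. -' (Python "ch in '_. -'" on a single ch is membership here)
def pvBSeps : List Char := ['_', '.', ' ', '-']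

-- the for-loop of Source B: out accumulates; a separator becomes '-' unless out already ends in '-'
def pvBLoop (out : List Char) : List Char → List Char
  | [] => out
  | ch :: t =>
    let c := if pvBSeps.contains ch then '-' else ch
    if c = '-' ∧ out.getLast? = some '-' then pvBLoop out t
    else pvBLoop (out ++ [c]) t

-- Python: if name and not name[0].isalpha(): name = 'model-' + name
def pvBGuard (name : String) : String :=
  match name.toList with
  | [] => name
  | c :: _ => if ¬ (PySem.Chars.isalpha c = true) then "model-" ++ name else name

def generate_ollama_model_name_alt (filename : String) : String :=
  -- ''.join(out) is String.ofList (exact: joining single characters with the empty separator)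
  pvBGuard (PySem.Str.stripChars (String.ofList (pvBLoop []
    (if PySem.Str.endswith (PySem.Str.lower filename) ".gguf" = true
      then PySem.Str.slice (PySem.Str.lower filename) none (some (-5))
      else PySem.Str.lower filename).toList)) "-")

-- ===== PRECONDITION & SPEC =====
def Spec_generate_ollama_model_name (filename : String) (out : String) : Prop := out = generate_ollama_model_name_alt filename
instance (filename : String) (out : String) : Decidable (Spec_generate_ollama_model_name filename out) := by unfold Spec_generate_ollama_model_name; infer_instance

-- ===== CLAIM (what is proved, stated in full; the proofs are below) =====
def Claim_equal_generate_ollama_model_name : Prop := ∀ (filename : String), Dom_generate_ollama_model_name filename → Spec_generate_ollama_model_name filename (generate_ollama_model_name filename)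

-- ===== LEMMAS AND PROOFS =====
-- the "collapse adjacent dashes" pass, parametrised by whether the last kept char was '-'
def pvColl : Bool → List Char → List Char
  | _, [] => []
  | b, c :: t => if c = '-' ∧ b = true then pvColl b t else c :: pvColl (c == '-') t

def pvRepl (c : Char) : Char := if pvBSeps.contains c then '-' else c

theorem pvColl_repAll (b : Bool) (l : List Char) : pvColl b (pvRepAll l) = pvColl b l := by
  fun_induction pvRepAll l generalizing b with
  | case1 => rfl
  | case2 c => rfl
  | case3 c d t hcd ih =>
    obtain ⟨rfl, rfl⟩ := hcd
    cases b with
    | true => simp [pvColl, ih]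
    | false => simp [pvColl, ih]
  | case4 c d t hcd ih =>
    by_cases hs : c = '-' ∧ b = true
    · simp only [pvColl, if_pos hs, ih]
    · simp only [pvColl, if_neg hs, ih]

theorem pvColl_eq_self (b : Bool) (l : List Char) (h : ¬ (['-', '-'] <:+: l))
    (hb : b = true → l.head? ≠ some '-') : pvColl b l = l := by
  induction l generalizing b with
  | nil => rfl
  | cons c t ih =>
    have hskip : ¬ (c = '-' ∧ b = true) := by
      rintro ⟨rfl, rfl⟩
      exact hb rfl (by simp)
    rw [pvColl, if_neg hskip]
    congr 1
    apply ih
    · intro hinf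
      exact h (hinf.trans (List.suffix_cons c t).isInfix)
    · intro hcb
      have hc : c = '-' := by simpa using hcb
      subst hc
      intro hh
      cases t with
      | nil => simp at hh
      | cons d t' =>
        simp at hh
        apply h
        subst hh
        exact ⟨[], t', rfl⟩

theorem pvACollapse_toList (s : String) : (pvACollapse s).toList = pvColl false s.toList := by
  fun_induction pvACollapse s with
  | case1 s h ih =>
    rw [ih]
    have hl : (PySem.Str.replace s "--" "-").toList = pvRepAll s.toList := by
      have h2 : "--".toList = ['-', '-'] := by decide
      have h3 : "-".toList = ['-'] := by decide
      simp [PySem.Str.toList_replace, h2, h3, pvReplace_dd]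
    rw [hl, pvColl_repAll]
  | case2 s h =>
    symm
    apply pvColl_eq_self
    · intro hinf
      apply h
      have h2 : "--".toList = ['-', '-'] := by decide
      simp only [PySem.Str.isIn_eq, h2]
      exact (PySem.Chars.isIn_iff_infix _ _).mpr hinf
    · intro hfalse; simp at hfalse

theorem pvGo_single (a b : Char) (fuel : Nat) (l acc : List Char) (h : l.length ≤ fuel) :
    PySem.Chars.replace.go [a] [b] fuel l acc
      = acc.reverse ++ l.map (fun c => if c = a then b else c) := by
  induction fuel generalizing l acc with
  | zero =>
    have : l = [] := by cases l <;> simp_all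
    subst this
    rw [PySem.Chars.replace.go.eq_def]; simp
  | succ n ih =>
    match l with
    | [] => rw [PySem.Chars.replace.go.eq_def]; simp
    | c :: t =>
      rw [PySem.Chars.replace.go.eq_def]
      simp only [List.length_cons] at h
      by_cases hc : c = a
      · subst hc
        have hpre : List.isPrefixOf [c] (c :: t) = true := by simp [List.isPrefixOf]
        simp only [hpre, if_pos]
        rw [show List.drop [c].length (c :: t) = t from rfl]
        rw [ih t _ (by omega)]
        simp
      · have hpre : List.isPrefixOf [a] (c :: t) = false := by
          simp [List.isPrefixOf]; intro he; exact hc he.symm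
        simp only [hpre, Bool.false_eq_true, if_neg, not_false_iff]
        rw [ih t (c :: acc) (by omega)]
        simp [hc]

theorem pvReplace_single (a b : Char) (l : List Char) :
    PySem.Chars.replace l [a] [b] = l.map (fun c => if c = a then b else c) := by
  rw [PySem.Chars.replace]
  simp [pvGo_single a b l.length l [] (le_refl _)]

theorem pvBLoop_eq (l out : List Char) :
    pvBLoop out l = out ++ pvColl (decide (out.getLast? = some '-')) (l.map pvRepl) := by
  induction l generalizing out with
  | nil => simp [pvBLoop, pvColl]
  | cons ch t ih =>
    rw [pvBLoop]
    simp only [List.map_cons]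
    by_cases hs : pvRepl ch = '-' ∧ out.getLast? = some '-'
    · rw [if_pos (by simpa [pvRepl] using hs)]
      rw [ih out]
      rw [pvColl, if_pos (by simp [hs.1, hs.2])]
    · rw [if_neg (by simpa [pvRepl] using hs)]
      rw [show (if pvBSeps.contains ch = true then '-' else ch) = pvRepl ch from rfl]
      rw [ih (out ++ [pvRepl ch])]
      rw [pvColl]
      rw [if_neg (by simpa [decide_eq_true_iff] using hs)]
      simp only [List.getLast?_concat, List.append_assoc, List.cons_append, List.nil_append]
      congr 2
      congr 1
      by_cases hd : pvRepl ch = '-' <;> simp [hd]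

theorem pvMap_chain (l : List Char) :
    ((l.map (fun c => if c = '_' then '-' else c)).map (fun c => if c = '.' then '-' else c)).map
        (fun c => if c = ' ' then '-' else c) = l.map pvRepl := by
  induction l with
  | nil => rfl
  | cons c t ih =>
    simp only [List.map_cons] at ih ⊢
    rw [ih]
    congr 1
    by_cases h1 : c = '_'
    · simp [h1, pvRepl, pvBSeps]
    · by_cases h2 : c = '.'
      · simp [h2, pvRepl, pvBSeps]
      · by_cases h3 : c = ' '
        · simp [h3, pvRepl, pvBSeps]
        · simp [h1, h2, h3, pvRepl, pvBSeps]

theorem pvCore (n1 : String) :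
    (pvACollapse (PySem.Str.replace (PySem.Str.replace (PySem.Str.replace n1 "_" "-") "." "-") " " "-")).toList
      = pvBLoop [] n1.toList := by
  rw [pvACollapse_toList, pvBLoop_eq]
  have hu : "_".toList = ['_'] := by decide
  have hd : ".".toList = ['.'] := by decide
  have hs : " ".toList = [' '] := by decide
  have hh : "-".toList = ['-'] := by decide
  have h2 : (PySem.Str.replace (PySem.Str.replace (PySem.Str.replace n1 "_" "-") "." "-") " " "-").toList
      = ((n1.toList.map (fun c => if c = '_' then '-' else c)).map
          (fun c => if c = '.' then '-' else c)).map (fun c => if c = ' ' then '-' else c) := by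
    simp [PySem.Str.toList_replace, hu, hd, hs, hh, pvReplace_single]
  rw [h2, pvMap_chain]
  simp

theorem pvStrip_eq (n1 : String) :
    PySem.Str.stripChars (pvACollapse (PySem.Str.replace (PySem.Str.replace
        (PySem.Str.replace n1 "_" "-") "." "-") " " "-")) "-"
      = PySem.Str.stripChars (String.ofList (pvBLoop [] n1.toList)) "-" := by
  apply String.toList_inj.mp
  simp only [PySem.Str.stripChars, String.toList_ofList]
  congr 1
  exact pvCore n1

theorem pvGuard_eq (s : String) : pvAGuard s = pvBGuard s := by
  unfold pvAGuard pvBGuard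
  rfl

-- ===== VERDICT (by name: the statement is the Claim_ definition above) =====
theorem generate_ollama_model_name_spec : Claim_equal_generate_ollama_model_name := by
  intro filename _
  unfold Spec_generate_ollama_model_name
  unfold generate_ollama_model_name generate_ollama_model_name_alt
  rw [pvStrip_eq]
  exact pvGuard_eq _
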